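-- pv_equiv track=rewrite | github.com/rohan20113/FCS_Real_Estate_Escrow | project_app/views.py | valid_text
-- ===== SOURCE A (Python) =====
-- def valid_text(str):
--     allowed_characters = 'ABCDEFGHIJKLMNOPQRSTUVWXYZabcdefghijklmnopqrstuvwxyz0123456789!@#$%^&*'
--     for i in str:
--         if i not in allowed_characters:
--             return False
--     lowered_string = str.lower()
--     restricted_keywords = ['select', 'insert', 'update', 'delete', 'union', 'onload', 'onmouseover', 'script']
--     for i in restricted_keywords:
--         if i in lowered_string:
--             return False
--     return True
-- ===== SOURCE B (Python) =====
-- def valid_text(str):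
--     # Single streaming pass: validate each character and watch for restricted
--     # keywords with an 11-char (longest keyword) lowered sliding window,
--     # instead of a full scan followed by a per-keyword substring search.
--     allowed_characters = set('ABCDEFGHIJKLMNOPQRSTUVWXYZabcdefghijklmnopqrstuvwxyz0123456789!@#$%^&*')
--     restricted_keywords = ('select', 'insert', 'update', 'delete', 'union', 'onload', 'onmouseover', 'script')
--     window = ''
--     for ch in str:
--         if ch not in allowed_characters:
--             return False
--         window = (window + ch.lower())[-11:]  # 11 = len('onmouseover')
--         if any(window.endswith(k) for k in restricted_keywords):
--             return False
--     return True
-- ===== Notes on version B (the rewrite author's own statement) =====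
-- stated objective: alternative
-- what changed: B makes a single streaming pass that checks each character and detects restricted keywords as suffixes of an 11-char lowered sliding window, instead of A's full character scan followed by a separate lowering and per-keyword substring search.
import Mathlib
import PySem

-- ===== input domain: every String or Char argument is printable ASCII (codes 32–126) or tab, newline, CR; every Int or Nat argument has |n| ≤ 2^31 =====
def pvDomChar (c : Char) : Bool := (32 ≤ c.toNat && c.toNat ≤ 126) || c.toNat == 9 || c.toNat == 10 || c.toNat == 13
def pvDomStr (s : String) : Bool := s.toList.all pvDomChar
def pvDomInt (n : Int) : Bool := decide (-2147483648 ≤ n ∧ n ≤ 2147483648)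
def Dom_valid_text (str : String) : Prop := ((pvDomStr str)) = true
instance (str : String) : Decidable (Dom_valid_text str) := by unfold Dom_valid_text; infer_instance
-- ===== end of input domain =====

-- B makes a single streaming pass with an 11-char lowered sliding window instead of
-- A's character scan followed by a separate lowering and per-keyword substring search.

-- ===== PORT A =====
def pvAllowedA : List Char :=
  "ABCDEFGHIJKLMNOPQRSTUVWXYZabcdefghijklmnopqrstuvwxyz0123456789!@#$%^&*".toList

def pvKeywordsA : List (List Char) :=
  ["select".toList, "insert".toList, "update".toList, "delete".toList,
   "union".toList, "onload".toList, "onmouseover".toList, "script".toList]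

-- 'for i in restricted_keywords: if i in lowered_string: return False' / final 'return True'
def pvKwLoopA : List (List Char) → List Char → Bool
  | [], _ => true
  | k :: ks, low => if PySem.Chars.isIn k low then false else pvKwLoopA ks low

-- 'for i in str: if i not in allowed_characters: return False', then the keyword loop
def pvCharLoopA : List Char → List Char → Bool
  | [], s => pvKwLoopA pvKeywordsA (PySem.Chars.lower s)
  | c :: t, s => if !(PySem.Chars.isIn [c] pvAllowedA) then false else pvCharLoopA t s

def valid_text (str : String) : Bool := pvCharLoopA str.toList str.toList

-- ===== PORT B =====
def pvAllowedSetB : PySem.Set Char :=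
  PySem.Set.ofList "ABCDEFGHIJKLMNOPQRSTUVWXYZabcdefghijklmnopqrstuvwxyz0123456789!@#$%^&*".toList

def pvKeywordsB : List (List Char) :=
  ["select".toList, "insert".toList, "update".toList, "delete".toList,
   "union".toList, "onload".toList, "onmouseover".toList, "script".toList]

-- '(window + ch.lower())[-11:]': the last min(11, len) chars — exact, Nat subtraction truncates at 0
def pvPush (w : List Char) (c : Char) : List Char :=
  let w' := w ++ PySem.Chars.lower [c]
  w'.drop (w'.length - 11)

def pvGoB : List Char → List Char → Bool
  | _, [] => true
  | w, c :: t =>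
    if !(PySem.Set.contains pvAllowedSetB c) then false
    else if pvKeywordsB.any (fun k => PySem.Chars.endswith (pvPush w c) k) then false
    else pvGoB (pvPush w c) t

def valid_text_alt (str : String) : Bool := pvGoB [] str.toList

-- ===== PRECONDITION & SPEC =====
def Spec_valid_text (str : String) (out : Bool) : Prop := out = valid_text_alt str
instance (str : String) (out : Bool) : Decidable (Spec_valid_text str out) := by unfold Spec_valid_text; infer_instance

-- ===== CLAIM (what is proved, stated in full; the proofs are below) =====
def Claim_equal_valid_text : Prop := ∀ (str : String), Dom_valid_text str → Spec_valid_text str (valid_text str)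

-- ===== LEMMAS AND PROOFS =====

-- last-11 window
def pvLastK (l : List Char) : List Char := l.drop (l.length - 11)

theorem pvLastK_suffix (l : List Char) : pvLastK l <:+ l := List.drop_suffix _ _

theorem pvLastK_length (l : List Char) : (pvLastK l).length = min 11 l.length := by
  simp [pvLastK]; omega

theorem pvSuffix_eq_of_len (a b : List Char) (h : a <:+ b) (hl : b.length ≤ a.length) : a = b := by
  obtain ⟨t, rfl⟩ := h
  have ht : t.length = 0 := by
    have := List.length_append (as := t) (bs := a)
    omega
  simp [List.eq_nil_of_length_eq_zero ht]

-- a suffix of length ≤ 11 survives the truncation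
theorem pvSuffix_lastK_iff (k u : List Char) (hk : k.length ≤ 11) :
    k <:+ pvLastK u ↔ k <:+ u := by
  constructor
  · intro h; exact h.trans (pvLastK_suffix u)
  · intro h
    rcases List.suffix_or_suffix_of_suffix h (pvLastK_suffix u) with h2 | h2
    · exact h2
    · have := pvSuffix_eq_of_len _ _ h2 (by
        have := h.length_le
        have := pvLastK_length u
        omega)
      rw [← this]
  
theorem pvLastK_append_lastK (y x : List Char) :
    pvLastK (pvLastK y ++ x) = pvLastK (y ++ x) := by
  have hy : pvLastK y ++ x <:+ y ++ x := by
    obtain ⟨t, ht⟩ := pvLastK_suffix y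
    exact ⟨t, by rw [← List.append_assoc, ht]⟩
  have h1 : pvLastK (pvLastK y ++ x) <:+ y ++ x := (pvLastK_suffix _).trans hy
  have h2 : pvLastK (y ++ x) <:+ y ++ x := pvLastK_suffix _
  have hlen : (pvLastK (pvLastK y ++ x)).length = (pvLastK (y ++ x)).length := by
    rw [pvLastK_length, pvLastK_length]
    simp [pvLastK_length]
    omega
  rcases List.suffix_or_suffix_of_suffix h1 h2 with h | h
  · exact pvSuffix_eq_of_len _ _ h (by omega)
  · exact (pvSuffix_eq_of_len _ _ h (by omega)).symm

theorem pvPush_eq (w c) : pvPush w c = pvLastK (w ++ PySem.Chars.lower [c]) := rfl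

-- the keyword-hit test on a window
def pvHit (w : List Char) : Bool := pvKeywordsB.any (fun k => PySem.Chars.endswith w k)

theorem pvHit_lastK (u : List Char) :
    pvHit (pvLastK u) = pvKeywordsB.any (fun k => PySem.Chars.endswith u k) := by
  apply PySem.List.any_congr_mem
  intro k hk
  have hlen : k.length ≤ 11 := by
    fin_cases hk <;> decide
  apply Bool.eq_iff_iff.mpr
  rw [PySem.Chars.endswith_iff, PySem.Chars.endswith_iff]
  exact pvSuffix_lastK_iff k u hlen

-- abstract trigger: did any step of the streaming loop see a keyword suffix?
def pvTrig : List Char → List Char → Bool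
  | _, [] => false
  | w, c :: t => pvHit (pvPush w c) || pvTrig (pvPush w c) t

def pvGood (c : Char) : Bool := PySem.Set.contains pvAllowedSetB c

-- B's loop, disentangled into the two independent conditions
theorem pvGoB_eq (cs : List Char) : ∀ w, pvGoB w cs = (cs.all pvGood && !pvTrig w cs) := by
  induction cs with
  | nil => intro w; simp [pvGoB, pvTrig]
  | cons c t ih =>
    intro w
    simp only [pvGoB, pvTrig, List.all_cons, pvGood]
    cases hc : PySem.Set.contains pvAllowedSetB c with
    | false =>
      rw [if_pos (by decide)]
      simp [Bool.false_and]
    | true =>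
      rw [if_neg (by decide)]
      cases hh : pvKeywordsB.any (fun k => PySem.Chars.endswith (pvPush w c) k) with
      | true =>
        rw [if_pos rfl]
        have : pvHit (pvPush w c) = true := hh
        simp [this]
      | false =>
        rw [if_neg (by decide)]
        have : pvHit (pvPush w c) = false := hh
        simp [this, ih]

-- the trigger fires iff some keyword is a suffix of the lowering of some nonempty prefix
theorem pvTrig_iff (cs : List Char) : ∀ lw,
    pvTrig (pvLastK lw) cs = true ↔
      ∃ k ∈ pvKeywordsB, ∃ p, p <+: cs ∧ p ≠ [] ∧ k <:+ lw ++ PySem.Chars.lower p := by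
  induction cs with
  | nil =>
    intro lw
    simp only [pvTrig, Bool.false_eq_true, false_iff]
    rintro ⟨k, hk, p, hp, hne, hs⟩
    exact hne (List.prefix_nil.1 hp)
  | cons c t ih =>
    intro lw
    have hpush : pvPush (pvLastK lw) c = pvLastK (lw ++ PySem.Chars.lower [c]) := by
      rw [pvPush_eq, pvLastK_append_lastK]
    rw [pvTrig, hpush, Bool.or_eq_true, pvHit_lastK, ih (lw ++ PySem.Chars.lower [c])]
    constructor
    · rintro (h | ⟨k, hk, p, hp, hne, hs⟩)
      · rw [List.any_eq_true] at h
        obtain ⟨k, hk, hs⟩ := h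
        rw [PySem.Chars.endswith_iff] at hs
        exact ⟨k, hk, [c], by simp, by simp, hs⟩
      · refine ⟨k, hk, c :: p, by simpa using hp, by simp, ?_⟩
        simpa [PySem.Chars.lower, List.append_assoc] using hs
    · rintro ⟨k, hk, p, hp, hne, hs⟩
      obtain ⟨c', p', rfl⟩ : ∃ c' p', p = c' :: p' := by
        cases p with
        | nil => exact absurd rfl hne
        | cons a b => exact ⟨a, b, rfl⟩
      obtain ⟨rfl, hp'⟩ : c' = c ∧ p' <+: t := by
        rcases hp with ⟨s, hs2⟩
        simp at hs2
        exact ⟨hs2.1, ⟨s, hs2.2⟩⟩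
      cases p' with
      | nil =>
        left
        rw [List.any_eq_true]
        refine ⟨k, hk, ?_⟩
        rw [PySem.Chars.endswith_iff]
        simpa [PySem.Chars.lower] using hs
      | cons a b =>
        right
        refine ⟨k, hk, a :: b, hp', by simp, ?_⟩
        simpa [PySem.Chars.lower, List.append_assoc] using hs

-- suffix-of-a-prefix ↔ infix (for nonempty k, on the lowered string)
theorem pvInfix_iff (k cs : List Char) (hk : k ≠ []) :
    (∃ p, p <+: cs ∧ p ≠ [] ∧ k <:+ PySem.Chars.lower p) ↔ k <:+: PySem.Chars.lower cs := by
  constructor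
  · rintro ⟨p, hp, -, hs⟩
    exact hs.isInfix.trans (hp.map PySem.Chars.lowerChar).isInfix
  · rintro ⟨t1, t2, h⟩
    refine ⟨cs.take (t1.length + k.length), List.take_prefix _ _, ?_, ?_⟩
    · have hlen : (PySem.Chars.lower cs).length = cs.length := by
        simp [PySem.Chars.lower]
      have : k.length ≤ cs.length := by
        have : (PySem.Chars.lower cs).length = t1.length + k.length + t2.length := by
          rw [← h]; simp; omega
        omega
      have hkpos : 0 < k.length := List.length_pos_iff.2 hk
      intro hn
      have := congrArg List.length hn
      rw [List.length_take, List.length_nil] at this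
      omega
    · have : PySem.Chars.lower (cs.take (t1.length + k.length)) = t1 ++ k := by
        simp only [PySem.Chars.lower, List.map_take]
        rw [show List.map PySem.Chars.lowerChar cs = t1 ++ k ++ t2 from h.symm,
          show t1.length + k.length = (t1 ++ k).length by simp, List.take_left]
      rw [this]
      exact List.suffix_append t1 k

-- A's keyword loop is the 'any' of the infix tests
theorem pvKwLoopA_eq (ks : List (List Char)) (low : List Char) :
    pvKwLoopA ks low = !(ks.any (fun k => PySem.Chars.isIn k low)) := by
  induction ks with
  | nil => simp [pvKwLoopA]
  | cons k t ih =>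
    simp only [pvKwLoopA, List.any_cons]
    by_cases h : PySem.Chars.isIn k low <;> simp [h, ih]

-- A's char loop, disentangled
theorem pvCharLoopA_eq (cs s : List Char) :
    pvCharLoopA cs s = (cs.all (fun c => PySem.Chars.isIn [c] pvAllowedA)
      && pvKwLoopA pvKeywordsA (PySem.Chars.lower s)) := by
  induction cs with
  | nil => simp [pvCharLoopA]
  | cons c t ih =>
    simp only [pvCharLoopA, List.all_cons]
    by_cases h : PySem.Chars.isIn [c] pvAllowedA <;> simp [h, ih]

-- the two character tests agree
set_option maxRecDepth 4000 in
theorem pvGood_eq (c : Char) : PySem.Chars.isIn [c] pvAllowedA = pvGood c := by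
  have hset : pvAllowedSetB = pvAllowedA := by decide
  by_cases h : c ∈ pvAllowedA
  · simp [PySem.Chars.isIn_iff_infix, (List.singleton_infix_iff ..).2 h,
      pvGood, PySem.Set.contains, hset, h]
  · have : ¬ ([c] <:+: pvAllowedA) := fun hh => h ((List.singleton_infix_iff ..).1 hh)
    simp [pvGood, PySem.Set.contains, hset, h]
    simp [show PySem.Chars.isIn [c] pvAllowedA = false from
      (PySem.Chars.isIn_eq_false_iff ..).2 this]

-- ===== VERDICT (by name: the statement is the Claim_ definition above) =====
theorem valid_text_spec : Claim_equal_valid_text := by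
  intro str _
  show valid_text str = valid_text_alt str
  rw [valid_text, valid_text_alt, pvCharLoopA_eq, pvGoB_eq, pvKwLoopA_eq,
    show pvKeywordsA = pvKeywordsB from rfl]
  have hlast : ([] : List Char) = pvLastK [] := rfl
  rw [show (List.all str.toList fun c => PySem.Chars.isIn [c] pvAllowedA)
        = List.all str.toList pvGood from
      List.all_congr rfl (fun c => pvGood_eq c)]
  congr 1
  congr 1
  rw [hlast]
  by_cases h : pvTrig (pvLastK []) str.toList = true
  · rw [h]
    obtain ⟨k, hk, p, hp, hne, hs⟩ := (pvTrig_iff str.toList []).1 h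
    have hkne : k ≠ [] := by fin_cases hk <;> decide
    have : k <:+: PySem.Chars.lower str.toList :=
      (pvInfix_iff k str.toList hkne).1 ⟨p, hp, hne, by simpa using hs⟩
    rw [List.any_eq_true.2 ⟨k, hk, (PySem.Chars.isIn_iff_infix k (PySem.Chars.lower str.toList)).2 this⟩]
  · rw [Bool.not_eq_true] at h
    rw [h]
    rw [show (pvKeywordsB.any fun k => PySem.Chars.isIn k (PySem.Chars.lower str.toList)) = false
      from ?_]
    rw [Bool.eq_false_iff, Ne, List.any_eq_true]
    rintro ⟨k, hk, hin⟩
    have hkne : k ≠ [] := by fin_cases hk <;> decide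
    obtain ⟨p, hp, hne, hs⟩ :=
      (pvInfix_iff k str.toList hkne).2 ((PySem.Chars.isIn_iff_infix k (PySem.Chars.lower str.toList)).1 hin)
    have : pvTrig (pvLastK []) str.toList = true :=
      (pvTrig_iff str.toList []).2 ⟨k, hk, p, hp, hne, by simpa using hs⟩
    rw [h] at this
    exact Bool.false_ne_true this
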